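-- pv_equiv track=rewrite | github.com/Lubichlyp/awatar | generowanie.py | _select_preferred_image_var
-- ===== SOURCE A (Python) =====
-- def _select_preferred_image_var(image_vars: list[str]) -> str:
--     if not image_vars:
--         return ""
--     exact_priorities = ["background", "image", "photo", "cover", "hero", "logo"]
--     for preferred in exact_priorities:
--         for name in image_vars:
--             if name.strip().lower() == preferred:
--                 return name
--     weighted = sorted(
--         image_vars,
--         key=lambda name: (
--             "background" not in name.lower(),
--             "cover" not in name.lower(),
--             "hero" not in name.lower(),
--             "logo" in name.lower(),
--         ),
--     )
--     return weighted[0]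
-- ===== SOURCE B (Python) =====
-- _PRIORITY_RANK = {kw: i for i, kw in enumerate(
--     ["background", "image", "photo", "cover", "hero", "logo"])}
--
--
-- def _select_preferred_image_var(image_vars: list[str]) -> str:
--     if not image_vars:
--         return ""
--
--     def sort_key(name: str):
--         rank = _PRIORITY_RANK.get(name.strip().lower())
--         if rank is not None:
--             # an exact priority match dominates all substring fallbacks
--             return (rank, False, False, False, False)
--         low = name.lower()
--         return (
--             6,
--             "background" not in low,
--             "cover" not in low,
--             "hero" not in low,
--             "logo" in low,
--         )
--
--     return min(image_vars, key=sort_key)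
-- ===== Notes on version B (the rewrite author's own statement) =====
-- stated objective: faster
-- what changed: A's two phases (6x nested scans over the priority keywords, then a stable 4-key sort of the whole list just to take element 0) are folded into one single-pass min() with a composite key whose leading component is the exact-match rank from a precomputed dict, so no sort and no repeated scans are performed.
import Mathlib
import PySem

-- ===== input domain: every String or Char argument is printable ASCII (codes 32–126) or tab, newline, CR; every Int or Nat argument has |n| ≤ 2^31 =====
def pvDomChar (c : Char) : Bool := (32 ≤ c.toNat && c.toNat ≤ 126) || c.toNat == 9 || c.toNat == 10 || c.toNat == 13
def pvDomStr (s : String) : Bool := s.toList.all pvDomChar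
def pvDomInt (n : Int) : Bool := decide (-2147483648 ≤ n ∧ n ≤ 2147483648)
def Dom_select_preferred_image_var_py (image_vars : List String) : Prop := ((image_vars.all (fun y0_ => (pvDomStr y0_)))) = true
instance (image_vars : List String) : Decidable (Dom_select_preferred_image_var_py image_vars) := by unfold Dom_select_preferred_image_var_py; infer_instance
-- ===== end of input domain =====

-- B replaces A's two phases (nested keyword scans, then a stable sort taken at [0]) by one
-- single-pass min() with a composite key led by the exact-match rank; same return value.

-- name.strip().lower(), shared by both Pythons
def pvStriplow (name : String) : String := PySem.Str.lower (PySem.Str.strip name)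

-- the 4 substring booleans of A's sort key / B's fallback key, encoded as the 4-bit integer
-- that orders exactly like Python's lexicographic bool 4-tuple (False < True)
def pvFlagBits (name : String) : Int :=
  (if PySem.Str.isIn "background" (PySem.Str.lower name) then 0 else 8) +
  (if PySem.Str.isIn "cover" (PySem.Str.lower name) then 0 else 4) +
  (if PySem.Str.isIn "hero" (PySem.Str.lower name) then 0 else 2) +
  (if PySem.Str.isIn "logo" (PySem.Str.lower name) then 1 else 0)

-- ===== PORT A =====
def pvExactPriorities : List String := ["background", "image", "photo", "cover", "hero", "logo"]

-- the two nested for-loops of A's first phase: first name matching the earliest keyword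
def pvPass1 (kws : List String) (xs : List String) : Option String :=
  match kws with
  | [] => none
  | k :: rest =>
    match xs.find? (fun name => pvStriplow name == k) with
    | some name => some name
    | none => pvPass1 rest xs

def select_preferred_image_var_py (image_vars : List String) : String :=
  if image_vars = [] then ""
  else
    match pvPass1 pvExactPriorities image_vars with
    | some name => name
    | none =>
      -- weighted = sorted(image_vars, key=<4-bool tuple>); return weighted[0]
      -- (image_vars is nonempty here, so index 0 exists; headD "" is that access)
      (PySem.List.sorted image_vars pvFlagBits false).headD ""

-- ===== PORT B =====
-- _PRIORITY_RANK = {kw: i for i, kw in enumerate([...])}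
def pvRankDict : PySem.Dict String Int :=
  PySem.Dict.ofList [("background", 0), ("image", 1), ("photo", 2), ("cover", 3), ("hero", 4), ("logo", 5)]

-- sort_key(name): Python's tuple (rank,b1,b2,b3,b4) / (6,b1,b2,b3,b4) compared lexicographically,
-- encoded exactly as the integer rank*16 + 8*b1 + 4*b2 + 2*b3 + b4 (each bool is one bit)
def pvSortKey (name : String) : Int :=
  match pvRankDict.get? (pvStriplow name) with
  | some r => 16 * r            -- (rank, False, False, False, False)
  | none => 96 + pvFlagBits name -- (6, b1, b2, b3, b4)

def select_preferred_image_var_py_alt (image_vars : List String) : String :=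
  if image_vars = [] then ""
  else (PySem.List.min? image_vars pvSortKey).getD ""

-- ===== PRECONDITION & SPEC =====
def Spec_select_preferred_image_var_py (image_vars : List String) (out : String) : Prop := out = select_preferred_image_var_py_alt image_vars
instance (image_vars : List String) (out : String) : Decidable (Spec_select_preferred_image_var_py image_vars out) := by unfold Spec_select_preferred_image_var_py; infer_instance

-- ===== CLAIM (what is proved, stated in full; the proofs are below) =====
def Claim_equal_select_preferred_image_var_py : Prop := ∀ (image_vars : List String), Dom_select_preferred_image_var_py image_vars → Spec_select_preferred_image_var_py image_vars (select_preferred_image_var_py image_vars)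

-- ===== LEMMAS AND PROOFS =====

-- rank of a (stripped, lowered) name in the priority list; 6 if absent
def pvR (s : String) : ℕ := List.idxOf s pvExactPriorities

-- the accumulator step of PySem.List.min?
def pvMinStep (key : String → Int) (acc : Option String) (x : String) : Option String :=
  match acc with
  | none => some x
  | some m => if key x < key m then some x else some m

set_option maxHeartbeats 1000000 in
lemma pv_min?_eq_foldl (xs : List String) (key : String → Int) :
    PySem.List.min? xs key = xs.foldl (pvMinStep key) none := by
  simp only [PySem.List.min?]
  apply List.foldl_ext
  intro acc x _
  cases acc with
  | none => rfl
  | some m => simp only [pvMinStep]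

lemma pv_flagBits_nonneg (n : String) : 0 ≤ pvFlagBits n := by
  unfold pvFlagBits; split_ifs <;> norm_num

lemma pv_sortKey_eq (n : String) :
    pvSortKey n = if pvR (pvStriplow n) < 6 then (16 * (pvR (pvStriplow n) : Int)) else 96 + pvFlagBits n := by
  unfold pvSortKey pvR pvExactPriorities
  generalize pvStriplow n = s
  by_cases h0 : s = "background"
  · subst h0
    rw [show pvRankDict.get? "background" = some 0 from by decide,
        show List.idxOf "background" ["background", "image", "photo", "cover", "hero", "logo"] = 0 from by decide]
    norm_num
  by_cases h1 : s = "image"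
  · subst h1
    rw [show pvRankDict.get? "image" = some 1 from by decide,
        show List.idxOf "image" ["background", "image", "photo", "cover", "hero", "logo"] = 1 from by decide]
    norm_num
  by_cases h2 : s = "photo"
  · subst h2
    rw [show pvRankDict.get? "photo" = some 2 from by decide,
        show List.idxOf "photo" ["background", "image", "photo", "cover", "hero", "logo"] = 2 from by decide]
    norm_num
  by_cases h3 : s = "cover"
  · subst h3
    rw [show pvRankDict.get? "cover" = some 3 from by decide,
        show List.idxOf "cover" ["background", "image", "photo", "cover", "hero", "logo"] = 3 from by decide]
    norm_num
  by_cases h4 : s = "hero"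
  · subst h4
    rw [show pvRankDict.get? "hero" = some 4 from by decide,
        show List.idxOf "hero" ["background", "image", "photo", "cover", "hero", "logo"] = 4 from by decide]
    norm_num
  by_cases h5 : s = "logo"
  · subst h5
    rw [show pvRankDict.get? "logo" = some 5 from by decide,
        show List.idxOf "logo" ["background", "image", "photo", "cover", "hero", "logo"] = 5 from by decide]
    norm_num
  have b0 : ("background" == s) = false := beq_eq_false_iff_ne.mpr (Ne.symm h0)
  have b1 : ("image" == s) = false := beq_eq_false_iff_ne.mpr (Ne.symm h1)
  have b2 : ("photo" == s) = false := beq_eq_false_iff_ne.mpr (Ne.symm h2)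
  have b3 : ("cover" == s) = false := beq_eq_false_iff_ne.mpr (Ne.symm h3)
  have b4 : ("hero" == s) = false := beq_eq_false_iff_ne.mpr (Ne.symm h4)
  have b5 : ("logo" == s) = false := beq_eq_false_iff_ne.mpr (Ne.symm h5)
  have hi : pvRankDict.items =
      [("background", (0 : Int)), ("image", 1), ("photo", 2), ("cover", 3), ("hero", 4), ("logo", 5)] := by decide
  have hg : pvRankDict.get? s = none := by
    simp [PySem.Dict.get?, hi, List.find?, b0, b1, b2, b3, b4, b5]
  have hx : List.idxOf s ["background", "image", "photo", "cover", "hero", "logo"] = 6 := by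
    simp [List.idxOf_cons, b0, b1, b2, b3, b4, b5]
  rw [hg, hx]
  norm_num

lemma pv_pass1_none (kws xs : List String) (h : pvPass1 kws xs = none) :
    ∀ y ∈ xs, ∀ k ∈ kws, pvStriplow y ≠ k := by
  induction kws with
  | nil => intro y _ k hk; cases hk
  | cons k rest ih =>
    intro y hy k' hk'
    unfold pvPass1 at h
    cases hf : xs.find? (fun name => pvStriplow name == k) with
    | some m => simp only [hf] at h; cases h
    | none =>
      simp only [hf] at h
      rcases List.mem_cons.mp hk' with rfl | hk'
      · have := List.find?_eq_none.mp hf y hy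
        simpa using this
      · exact ih h y hy k' hk'

lemma pv_pass1_some (kws xs : List String) (n : String) (h : pvPass1 kws xs = some n) :
    ∃ l r, xs = l ++ n :: r ∧ List.idxOf (pvStriplow n) kws < kws.length ∧
      (∀ y ∈ l, List.idxOf (pvStriplow n) kws < List.idxOf (pvStriplow y) kws) ∧
      (∀ y ∈ r, List.idxOf (pvStriplow n) kws ≤ List.idxOf (pvStriplow y) kws) := by
  induction kws with
  | nil => cases h
  | cons k rest ih =>
    unfold pvPass1 at h
    cases hf : xs.find? (fun name => pvStriplow name == k) with
    | some m =>
      simp only [hf] at h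
      obtain rfl : n = m := (Option.some.inj h).symm
      obtain ⟨hpn, l, r, hxs, hl⟩ := List.find?_eq_some_iff_append.mp hf
      have hn : pvStriplow n = k := by simpa using hpn
      refine ⟨l, r, hxs, ?_, ?_, ?_⟩
      · simp [hn]
      · intro y hy
        have hne : pvStriplow y ≠ k := by simpa using hl y hy
        simp [List.idxOf_cons, hn, hne.symm]
      · intro y hy; simp [List.idxOf_cons, hn]
    | none =>
      simp only [hf] at h
      obtain ⟨l, r, hxs, hlen, hl, hr⟩ := ih h
      have hall : ∀ y ∈ xs, pvStriplow y ≠ k := by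
        intro y hy; have := List.find?_eq_none.mp hf y hy; simpa using this
      have hidx : ∀ y ∈ xs, List.idxOf (pvStriplow y) (k :: rest) = List.idxOf (pvStriplow y) rest + 1 := by
        intro y hy
        have : (k == pvStriplow y) = false := by
          simpa [beq_eq_false_iff_ne] using (hall y hy).symm
        simp [List.idxOf_cons, this]
      have hnxs : n ∈ xs := by rw [hxs]; simp
      refine ⟨l, r, hxs, ?_, ?_, ?_⟩
      · rw [hidx n hnxs]; simpa using Nat.succ_lt_succ hlen
      · intro y hy
        have hyxs : y ∈ xs := by rw [hxs]; exact List.mem_append.mpr (Or.inl hy)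
        rw [hidx n hnxs, hidx y hyxs]; exact Nat.succ_lt_succ (hl y hy)
      · intro y hy
        have hyxs : y ∈ xs := by rw [hxs]; simp [hy]
        rw [hidx n hnxs, hidx y hyxs]; exact Nat.succ_le_succ (hr y hy)

lemma pv_foldl_minStep_inv (key : String → Int) (n : String) :
    ∀ (l : List String) (acc : Option String), (∀ y ∈ l, key n < key y) →
      (acc = none ∨ ∃ m, acc = some m ∧ key n < key m) →
      (l.foldl (pvMinStep key) acc = none ∨ ∃ m, l.foldl (pvMinStep key) acc = some m ∧ key n < key m) := by
  intro l
  induction l with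
  | nil => intro acc _ hacc; simpa using hacc
  | cons x t ih =>
    intro acc hlt hacc
    have hx : key n < key x := hlt x (by simp)
    have hstep : pvMinStep key acc x = none ∨ ∃ m, pvMinStep key acc x = some m ∧ key n < key m := by
      rcases hacc with h | ⟨m, rfl, hm⟩
      · subst h; exact Or.inr ⟨x, rfl, hx⟩
      · simp only [pvMinStep]
        split_ifs with h
        · exact Or.inr ⟨x, rfl, hx⟩
        · exact Or.inr ⟨m, rfl, hm⟩
    exact ih (pvMinStep key acc x) (fun y hy => hlt y (by simp [hy])) hstep

lemma pv_foldl_minStep_keep (key : String → Int) (n : String) :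
    ∀ (r : List String), (∀ y ∈ r, key n ≤ key y) → r.foldl (pvMinStep key) (some n) = some n := by
  intro r
  induction r with
  | nil => intro _; rfl
  | cons x t ih =>
    intro hle
    have hx : ¬ key x < key n := not_lt.mpr (hle x (by simp))
    have : pvMinStep key (some n) x = some n := by simp only [pvMinStep]; rw [if_neg hx]
    rw [List.foldl_cons, this]
    exact ih (fun y hy => hle y (by simp [hy]))

lemma pv_min_first (key : String → Int) (l r : List String) (n : String)
    (hl : ∀ y ∈ l, key n < key y) (hr : ∀ y ∈ r, key n ≤ key y) :
    PySem.List.min? (l ++ n :: r) key = some n := by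
  rw [pv_min?_eq_foldl, List.foldl_append, List.foldl_cons]
  have hacc := pv_foldl_minStep_inv key n l none hl (Or.inl rfl)
  have hstep : pvMinStep key (l.foldl (pvMinStep key) none) n = some n := by
    rcases hacc with h | ⟨m, h, hm⟩
    · rw [h]; rfl
    · rw [h]; simp only [pvMinStep]; rw [if_pos hm]
  rw [hstep]
  exact pv_foldl_minStep_keep key n r hr

lemma pv_head_insertBy (key : String → Int) (x : String) (s : List String) :
    (PySem.List.insertBy (fun a b => decide (key a < key b)) x s).head? = some ((pvMinStep key s.head? x).getD x) := by
  cases s with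
  | nil => simp [PySem.List.insertBy, pvMinStep]
  | cons y ys =>
    simp only [PySem.List.insertBy]
    split_ifs with h
    · have h' : key x < key y := by simpa using h
      simp [pvMinStep, if_pos h']
    · have h' : ¬ key x < key y := by simpa using h
      simp [pvMinStep, if_neg h']

lemma pv_head_sorted (key : String → Int) :
    ∀ (xs s : List String),
      (xs.foldl (fun acc x => PySem.List.insertBy (fun a b => decide (key a < key b)) x acc) s).head? =
      xs.foldl (pvMinStep key) s.head? := by
  intro xs
  induction xs with
  | nil => intro s; rfl
  | cons x t ih =>
    intro s
    rw [List.foldl_cons, List.foldl_cons, ih]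
    congr 1
    rw [pv_head_insertBy]
    cases s with
    | nil => rfl
    | cons y ys => simp only [List.head?_cons, pvMinStep]; split_ifs <;> rfl

lemma pv_min_congr (k1 k2 : String → Int) (c : Int) :
    ∀ (xs : List String) (a : Option String), (∀ y ∈ xs, k1 y = c + k2 y) →
      (∀ m, a = some m → k1 m = c + k2 m) →
      xs.foldl (pvMinStep k1) a = xs.foldl (pvMinStep k2) a := by
  intro xs
  induction xs with
  | nil => intro a _ _; rfl
  | cons x t ih =>
    intro a hmem hacc
    have hx : k1 x = c + k2 x := hmem x (by simp)
    have hstep : pvMinStep k1 a x = pvMinStep k2 a x := by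
      cases a with
      | none => rfl
      | some m =>
        have hm := hacc m rfl
        simp only [pvMinStep]
        have hiff : k1 x < k1 m ↔ k2 x < k2 m := by rw [hx, hm]; omega
        by_cases hc : k2 x < k2 m
        · rw [if_pos (hiff.mpr hc), if_pos hc]
        · rw [if_neg (fun hh => hc (hiff.mp hh)), if_neg hc]
    rw [List.foldl_cons, List.foldl_cons, hstep]
    refine ih (pvMinStep k2 a x) (fun y hy => hmem y (by simp [hy])) ?_
    intro m hm
    cases a with
    | none => simp [pvMinStep] at hm; subst hm; exact hx
    | some m' =>
      simp only [pvMinStep] at hm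
      split_ifs at hm <;> (cases hm; first | exact hx | exact hacc _ rfl)

-- ===== VERDICT (by name: the statement is the Claim_ definition above) =====
theorem select_preferred_image_var_py_spec : Claim_equal_select_preferred_image_var_py := by
  intro xs _
  unfold Spec_select_preferred_image_var_py select_preferred_image_var_py select_preferred_image_var_py_alt
  by_cases hxs : xs = []
  · simp [hxs]
  rw [if_neg hxs, if_neg hxs]
  cases hp : pvPass1 pvExactPriorities xs with
  | some n =>
    obtain ⟨l, r, hdec, hlen, hl, hr⟩ := pv_pass1_some _ _ _ hp
    have hRn : pvR (pvStriplow n) < 6 := by simpa [pvR, pvExactPriorities] using hlen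
    have hkn : pvSortKey n = 16 * (pvR (pvStriplow n) : Int) := by rw [pv_sortKey_eq, if_pos hRn]
    have key_ge : ∀ y : String, pvR (pvStriplow n) ≤ pvR (pvStriplow y) → pvSortKey n ≤ pvSortKey y := by
      intro y hy
      rw [hkn, pv_sortKey_eq y]
      split_ifs with h
      · have : (pvR (pvStriplow n) : Int) ≤ (pvR (pvStriplow y) : Int) := by exact_mod_cast hy
        omega
      · have := pv_flagBits_nonneg y
        have : (pvR (pvStriplow n) : Int) ≤ 5 := by exact_mod_cast Nat.lt_succ_iff.mp hRn
        omega
    have key_gt : ∀ y : String, pvR (pvStriplow n) < pvR (pvStriplow y) → pvSortKey n < pvSortKey y := by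
      intro y hy
      rw [hkn, pv_sortKey_eq y]
      split_ifs with h
      · have : (pvR (pvStriplow n) : Int) < (pvR (pvStriplow y) : Int) := by exact_mod_cast hy
        omega
      · have := pv_flagBits_nonneg y
        have : (pvR (pvStriplow n) : Int) ≤ 5 := by exact_mod_cast Nat.lt_succ_iff.mp hRn
        omega
    have hmin : PySem.List.min? xs pvSortKey = some n := by
      rw [hdec]
      exact pv_min_first pvSortKey l r n
        (fun y hy => key_gt y (hl y hy)) (fun y hy => key_ge y (hr y hy))
    rw [hmin]; rfl
  | none =>
    have hnot := pv_pass1_none _ _ hp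
    have hkey : ∀ y ∈ xs, pvSortKey y = 96 + pvFlagBits y := by
      intro y hy
      rw [pv_sortKey_eq y, if_neg ?_]
      intro hlt
      have hmem : pvStriplow y ∈ pvExactPriorities := by
        have : List.idxOf (pvStriplow y) pvExactPriorities < pvExactPriorities.length := by
          simpa [pvR, pvExactPriorities] using hlt
        exact List.idxOf_lt_length_iff.mp this
      exact hnot y hy (pvStriplow y) hmem rfl
    have hcongr : PySem.List.min? xs pvSortKey = PySem.List.min? xs pvFlagBits := by
      rw [pv_min?_eq_foldl, pv_min?_eq_foldl]
      exact pv_min_congr pvSortKey pvFlagBits 96 xs none hkey (by intro m h; cases h)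
    have hhead : (PySem.List.sorted xs pvFlagBits false).head? = PySem.List.min? xs pvFlagBits := by
      rw [PySem.List.sorted_eq_foldl_insertBy, pv_min?_eq_foldl]
      simpa using pv_head_sorted pvFlagBits xs []
    cases hm : PySem.List.min? xs pvFlagBits with
    | none => exact absurd ((PySem.List.min?_eq_none_iff xs pvFlagBits).mp hm) hxs
    | some m =>
      rw [hcongr, hm]
      rw [hm] at hhead
      cases hs : PySem.List.sorted xs pvFlagBits false with
      | nil => rw [hs] at hhead; cases hhead
      | cons h t => rw [hs] at hhead; cases hhead; rfl
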